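-- pv_equiv track=rewrite | github.com/mfornet/acm-icpc-solutions | project-euler/600/main.py | solution
-- ===== SOURCE A (Python) =====
-- def solution(n):
--     # Really cool (and fast) code here...
--     answer = 0
--     for s in range(3, n - 2):
--         c = (n - 2 * s) // 3
--
--         if s % 3 == 0:
--             B = s // 3
--             answer += s // 3
--         else:
--             B = s // 3 + 1
--
--         f1 = lambda x : (x + 1) * x // 2
--         f2 = lambda x : (2 * x + 1) * (x + 1) * x // 6
--
--         A = max(1, 1 - c)
--
--         answer += 3 * ( s * c * (B - A) + (s - 3 * c) * (f1(B - 1) - f1(A-1))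
--                         -3 * (f2(B - 1) - f2(A-1)))
--
--     return answer
-- ===== SOURCE B (Python) =====
-- def solution(n):
--     # Swap the order of summation: substituting d = s - 3a, b = c + a turns the
--     # whole region into {1 <= b < (n-2d)//3}, so one loop over the gap d with a
--     # single triangular number per term replaces A's loop over s with its mod-3
--     # branch and three Faulhaber pieces.
--     if n < 6:
--         return 0
--     q = (n - 3) // 3
--     total = q * (q + 1) // 2
--     for d in range(1, (n - 6) // 2 + 1):
--         m = (n - 2 * d) // 3 - 1
--         total += 3 * d * (m * (m + 1) // 2)
--     return total
-- ===== Notes on version B (the rewrite author's own statement) =====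
-- stated objective: alternative
-- what changed: B swaps the order of summation via the change of variables d = s - 3a, b = c + a: instead of A's loop over s with a mod-3 branch and three Faulhaber pieces (triangular and square-pyramidal sums), B sums one triangular number per gap value d over a single branch-free loop of half the length, with the s%3==0 bonus collapsed into one closed-form triangular number.
import Mathlib
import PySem

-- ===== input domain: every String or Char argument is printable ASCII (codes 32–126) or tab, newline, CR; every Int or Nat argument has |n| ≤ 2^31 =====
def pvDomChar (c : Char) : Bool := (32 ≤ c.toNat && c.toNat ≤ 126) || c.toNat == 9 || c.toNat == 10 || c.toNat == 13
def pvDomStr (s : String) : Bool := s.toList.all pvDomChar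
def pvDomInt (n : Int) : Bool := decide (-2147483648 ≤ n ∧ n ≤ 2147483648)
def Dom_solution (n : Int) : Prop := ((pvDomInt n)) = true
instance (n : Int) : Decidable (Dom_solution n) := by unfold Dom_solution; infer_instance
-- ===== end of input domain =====

-- B swaps the order of summation (substituting d = s-3a, b = c+a): one loop over the
-- gap d with a single triangular number per term replaces A's loop over s with its
-- mod-3 branch and three Faulhaber pieces (objective: alternative traversal).

-- ===== PORT A =====
def solution (n : Int) : Int :=
  (PySem.List.pyRange 3 (n - 2) 1).foldl (fun answer s =>
    let c := PySem.Int.floordiv (n - 2 * s) 3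
    let p : Int × Int :=
      if PySem.Int.mod s 3 = 0 then (PySem.Int.floordiv s 3, answer + PySem.Int.floordiv s 3)
      else (PySem.Int.floordiv s 3 + 1, answer)
    let B := p.1
    let answer := p.2
    let f1 := fun x : Int => PySem.Int.floordiv ((x + 1) * x) 2
    let f2 := fun x : Int => PySem.Int.floordiv ((2 * x + 1) * (x + 1) * x) 6
    let A := max 1 (1 - c)
    answer + 3 * (s * c * (B - A) + (s - 3 * c) * (f1 (B - 1) - f1 (A - 1))
      - 3 * (f2 (B - 1) - f2 (A - 1)))) 0

-- ===== PORT B =====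
def solution_alt (n : Int) : Int :=
  if n < 6 then 0
  else
    let q := PySem.Int.floordiv (n - 3) 3
    (PySem.List.pyRange 1 (PySem.Int.floordiv (n - 6) 2 + 1) 1).foldl
      (fun total d =>
        let m := PySem.Int.floordiv (n - 2 * d) 3 - 1
        total + 3 * d * (PySem.Int.floordiv (m * (m + 1)) 2))
      (PySem.Int.floordiv (q * (q + 1)) 2)

-- ===== PRECONDITION & SPEC =====
def Spec_solution (n : Int) (out : Int) : Prop := out = solution_alt n
instance (n : Int) (out : Int) : Decidable (Spec_solution n out) := by unfold Spec_solution; infer_instance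

-- ===== CLAIM (what is proved, stated in full; the proofs are below) =====
def Claim_equal_solution : Prop := ∀ (n : Int), Dom_solution n → Spec_solution n (solution n)

-- ===== LEMMAS AND PROOFS =====

-- A's closed-form pieces and B's building blocks
def pvF1 (x : Int) : Int := PySem.Int.floordiv ((x + 1) * x) 2
def pvF2 (x : Int) : Int := PySem.Int.floordiv ((2 * x + 1) * (x + 1) * x) 6
def pvTri (x : Int) : Int := PySem.Int.floordiv (x * (x + 1)) 2
def pvBonus (s : Int) : Int := if PySem.Int.mod s 3 = 0 then PySem.Int.floordiv s 3 else 0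

-- the inner enumeration of A's closed forms, as a list sum
def pvInnerL (n s : Int) : Int :=
  ((PySem.List.pyRange (max 1 (1 - PySem.Int.floordiv (n - 2 * s) 3))
      (PySem.Int.floordiv (s + 2) 3) 1).map
    (fun a => 3 * (PySem.Int.floordiv (n - 2 * s) 3 + a) * (s - 3 * a))).sum

-- per-iteration term of A's loop (bonus for s % 3 == 0 included)
def pvGA (n s : Int) : Int :=
  (if PySem.Int.mod s 3 = 0 then PySem.Int.floordiv s 3 else 0)
  + 3 * (s * PySem.Int.floordiv (n - 2 * s) 3
      * ((if PySem.Int.mod s 3 = 0 then PySem.Int.floordiv s 3 else PySem.Int.floordiv s 3 + 1)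
          - max 1 (1 - PySem.Int.floordiv (n - 2 * s) 3))
    + (s - 3 * PySem.Int.floordiv (n - 2 * s) 3)
      * (pvF1 ((if PySem.Int.mod s 3 = 0 then PySem.Int.floordiv s 3 else PySem.Int.floordiv s 3 + 1) - 1)
        - pvF1 (max 1 (1 - PySem.Int.floordiv (n - 2 * s) 3) - 1))
    - 3 * (pvF2 ((if PySem.Int.mod s 3 = 0 then PySem.Int.floordiv s 3 else PySem.Int.floordiv s 3 + 1) - 1)
        - pvF2 (max 1 (1 - PySem.Int.floordiv (n - 2 * s) 3) - 1)))

-- per-iteration term of B's loop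
def pvHB (n d : Int) : Int :=
  3 * d * (PySem.Int.floordiv ((PySem.Int.floordiv (n - 2 * d) 3 - 1)
    * (PySem.Int.floordiv (n - 2 * d) 3 - 1 + 1)) 2)

lemma pvF1_exact (x : Int) : 2 * pvF1 x = (x + 1) * x := by
  obtain ⟨k, hk⟩ := Int.even_mul_succ_self x
  have hx : (x + 1) * x = 2 * k := by rw [mul_comm, hk]; ring
  simp [pvF1, PySem.Int.floordiv, hx, Int.mul_fdiv_cancel_left k (by norm_num : (2:Int) ≠ 0)]

lemma pvSix_dvd (x : Int) : (6:Int) ∣ x * (x + 1) * (2 * x + 1) := by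
  have h2 : (2:Int) ∣ x * (x + 1) * (2 * x + 1) :=
    Dvd.dvd.mul_right (Int.even_mul_succ_self x).two_dvd _
  have h3 : (3:Int) ∣ x * (x + 1) * (2 * x + 1) := by
    have : x % 3 = 0 ∨ x % 3 = 1 ∨ x % 3 = 2 := by omega
    rcases this with h | h | h
    · exact Dvd.dvd.mul_right (Dvd.dvd.mul_right (Int.dvd_of_emod_eq_zero h) _) _
    · exact Dvd.dvd.mul_left (Int.dvd_of_emod_eq_zero (by omega : (2 * x + 1) % 3 = 0)) _
    · exact Dvd.dvd.mul_right (Dvd.dvd.mul_left (Int.dvd_of_emod_eq_zero (by omega : (x + 1) % 3 = 0)) _) _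
  exact (by norm_num : IsCoprime (2:Int) 3).mul_dvd h2 h3

lemma pvF2_exact (x : Int) : 6 * pvF2 x = (2 * x + 1) * (x + 1) * x := by
  obtain ⟨k, hk⟩ := pvSix_dvd x
  have hx : (2 * x + 1) * (x + 1) * x = 6 * k := by rw [← hk]; ring
  simp [pvF2, PySem.Int.floordiv, hx, Int.mul_fdiv_cancel_left k (by norm_num : (6:Int) ≠ 0)]

lemma pvTri_two (x : Int) : 2 * pvTri x = x * (x + 1) := by
  obtain ⟨k, hk⟩ := Int.even_mul_succ_self x
  have hx : x * (x + 1) = 2 * k := by rw [hk]; ring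
  simp [pvTri, PySem.Int.floordiv, hx, Int.mul_fdiv_cancel_left k (by norm_num : (2:Int) ≠ 0)]

lemma pvTri_succ (x : Int) : pvTri (x + 1) = pvTri x + (x + 1) := by
  have h1 := pvTri_two (x + 1)
  have h2 := pvTri_two x
  have h3 : (x + 1) * (x + 1 + 1) = x * (x + 1) + 2 * (x + 1) := by ring
  linarith

-- the inner enumeration sums to A's Faulhaber expression
lemma pvInnerSum (c s lo : Int) (k : Nat) :
    ((PySem.List.pyRange lo (lo + (k:Int)) 1).map
        (fun a => 3 * (c + a) * (s - 3 * a))).sum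
      = 3 * (s * c * ((lo + (k:Int)) - lo)
          + (s - 3 * c) * (pvF1 ((lo + (k:Int)) - 1) - pvF1 (lo - 1))
          - 3 * (pvF2 ((lo + (k:Int)) - 1) - pvF2 (lo - 1))) := by
  induction k generalizing lo with
  | zero =>
      rw [show lo + ((0:Nat):Int) = lo by push_cast; ring,
        PySem.List.pyRange_one_eq_nil (le_refl lo)]
      simp only [List.map_nil, List.sum_nil]
      ring
  | succ m ih =>
      have harg : lo + ((m+1:Nat):Int) = (lo + 1) + (m:Int) := by push_cast; ring
      rw [harg, PySem.List.pyRange_one_cons (by omega : lo < (lo + 1) + (m:Int)),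
        List.map_cons, List.sum_cons]
      have ih' := ih (lo + 1)
      rw [show lo + 1 - 1 = lo from by ring] at ih'
      have a1 := pvF1_exact lo
      have a2 := pvF1_exact (lo - 1)
      have b1 := pvF2_exact lo
      have b2 := pvF2_exact (lo - 1)
      apply mul_left_cancel₀ (by norm_num : (6:Int) ≠ 0)
      linear_combination 6 * ih' + (-9 * (s - 3 * c)) * a1 + (9 * (s - 3 * c)) * a2
        + 9 * b1 - 9 * b2

-- A's loop is the running sum of pvGA
lemma pvFoldlA (n : Int) (l : List Int) (acc : Int) :
    (l.foldl (fun answer s =>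
      let c := PySem.Int.floordiv (n - 2 * s) 3
      let p : Int × Int :=
        if PySem.Int.mod s 3 = 0 then (PySem.Int.floordiv s 3, answer + PySem.Int.floordiv s 3)
        else (PySem.Int.floordiv s 3 + 1, answer)
      let B := p.1
      let answer := p.2
      let f1 := fun x : Int => PySem.Int.floordiv ((x + 1) * x) 2
      let f2 := fun x : Int => PySem.Int.floordiv ((2 * x + 1) * (x + 1) * x) 6
      let A := max 1 (1 - c)
      answer + 3 * (s * c * (B - A) + (s - 3 * c) * (f1 (B - 1) - f1 (A - 1))
        - 3 * (f2 (B - 1) - f2 (A - 1)))) acc)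
    = acc + (l.map (pvGA n)).sum := by
  induction l generalizing acc with
  | nil => simp
  | cons s t ih =>
      rw [List.foldl_cons, ih, List.map_cons, List.sum_cons]
      simp only [pvGA, pvF1, pvF2]
      split <;> ring

-- on every s the loop visits, A's closed-form term equals bonus + enumerated inner sum
lemma pvTerm_eq (n s : Int) (h1 : 3 ≤ s) (h2 : s < n - 2) :
    pvGA n s = pvBonus s + pvInnerL n s := by
  unfold pvGA pvBonus pvInnerL
  have h3 : (0:Int) < 3 := by norm_num
  simp only [PySem.Int.mod_eq_emod_of_pos h3, PySem.Int.floordiv_eq_ediv_of_pos h3]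
  have hBv : (if s % 3 = 0 then s / 3 else s / 3 + 1) = (s + 2) / 3 := by split <;> omega
  rw [hBv]
  set c := (n - 2 * s) / 3 with hc
  obtain ⟨k, hk⟩ : ∃ k : Nat, (s + 2) / 3 = max 1 (1 - c) + (k:Int) :=
    ⟨((s + 2) / 3 - max 1 (1 - c)).toNat, by
      have : max 1 (1 - c) ≤ (s + 2) / 3 := max_le (by omega) (by omega)
      omega⟩
  rw [hk, pvInnerSum c s (max 1 (1 - c)) k]

-- B's loop is the running sum of pvHB
lemma pvFoldlB (n : Int) (l : List Int) (acc : Int) :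
    (l.foldl (fun total d =>
      let m := PySem.Int.floordiv (n - 2 * d) 3 - 1
      total + 3 * d * (PySem.Int.floordiv (m * (m + 1)) 2)) acc)
    = acc + (l.map (pvHB n)).sum := by
  induction l generalizing acc with
  | nil => simp
  | cons d t ih =>
      rw [List.foldl_cons, ih, List.map_cons, List.sum_cons]
      simp only [pvHB]
      ring

lemma pvIcoSucc (a b : Int) (h : a ≤ b) :
    Finset.Ico a (b + 1) = insert b (Finset.Ico a b) := by
  ext x; simp only [Finset.mem_Ico, Finset.mem_insert]; omega

-- list sums over pyRange are Finset sums over Ico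
lemma pvListSumIco (f : Int → Int) (a : Int) (k : Nat) :
    ((PySem.List.pyRange a (a + (k:Int)) 1).map f).sum
      = ∑ x ∈ Finset.Ico a (a + (k:Int)), f x := by
  induction k with
  | zero =>
      rw [show a + ((0:Nat):Int) = a by push_cast; ring,
        PySem.List.pyRange_one_eq_nil (le_refl a)]
      simp
  | succ m ih =>
      have h1 : a ≤ a + (m:Int) := by omega
      rw [show a + ((m+1:Nat):Int) = (a + (m:Int)) + 1 by push_cast; ring,
        PySem.List.pyRange_one_succ_right h1, List.map_append, List.sum_append,
        pvIcoSucc a (a + (m:Int)) h1, Finset.sum_insert (by simp), ih]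
      simp [add_comm]

-- Gauss sum over an Ico of integers
lemma pvGauss (m : Nat) : (∑ x ∈ Finset.Ico (1:Int) ((m:Int)+1), x) = pvTri (m:Int) := by
  induction m with
  | zero => simp [pvTri, PySem.Int.floordiv]
  | succ m ih =>
      rw [show ((m+1:Nat):Int) + 1 = ((m:Int)+1) + 1 by push_cast; ring,
        pvIcoSucc 1 ((m:Int)+1) (by omega), Finset.sum_insert (by simp), ih, show ((m+1:Nat):Int) = (m:Int)+1 by push_cast; ring,
        pvTri_succ]
      ring

-- the summation swap (s, a) ↦ (d, b) = (s - 3a, c + a)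
lemma pvSwap (n : Int) :
    (∑ s ∈ Finset.Ico (3:Int) (n-2), ∑ a ∈ Finset.Ico (max 1 (1 - (n-2*s)/3)) ((s+2)/3),
        3 * ((n-2*s)/3 + a) * (s - 3*a))
    = ∑ d ∈ Finset.Ico (1:Int) ((n-6)/2+1), ∑ b ∈ Finset.Ico (1:Int) ((n-2*d)/3),
        3 * d * b := by
  rw [← Finset.sum_sigma (Finset.Ico (3:Int) (n-2))
      (fun s => Finset.Ico (max 1 (1 - (n-2*s)/3)) ((s+2)/3))
      (fun x => 3 * ((n-2*x.1)/3 + x.2) * (x.1 - 3*x.2)),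
    ← Finset.sum_sigma (Finset.Ico (1:Int) ((n-6)/2+1))
      (fun d => Finset.Ico (1:Int) ((n-2*d)/3))
      (fun y => 3 * y.1 * y.2)]
  refine Finset.sum_nbij'
    (i := fun x => ⟨x.1 - 3*x.2, (n - 2*x.1)/3 + x.2⟩)
    (j := fun y => ⟨3*((n - 2*y.1)/3 - y.2) + y.1, (n - 2*y.1)/3 - y.2⟩)
    ?_ ?_ ?_ ?_ ?_
  · rintro ⟨s, a⟩ hm
    simp only [Finset.mem_sigma, Finset.mem_Ico, max_le_iff] at hm ⊢
    omega
  · rintro ⟨d, b⟩ hm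
    simp only [Finset.mem_sigma, Finset.mem_Ico, max_le_iff] at hm ⊢
    omega
  · rintro ⟨s, a⟩ hm
    simp only [Finset.mem_sigma, Finset.mem_Ico, max_le_iff] at hm
    simp only [Sigma.mk.injEq, heq_eq_eq]
    constructor <;> omega
  · rintro ⟨d, b⟩ hm
    simp only [Finset.mem_sigma, Finset.mem_Ico] at hm
    simp only [Sigma.mk.injEq, heq_eq_eq]
    constructor <;> omega
  · rintro ⟨s, a⟩ hm
    ring

-- inner list sum as a Finset sum (for s the loop visits)
lemma pvInnerL_finset (n s : Int) (h1 : 3 ≤ s) (h2 : s < n - 2) :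
    pvInnerL n s
      = ∑ a ∈ Finset.Ico (max 1 (1 - (n-2*s)/3)) ((s+2)/3),
          3 * ((n-2*s)/3 + a) * (s - 3*a) := by
  unfold pvInnerL
  have h3 : (0:Int) < 3 := by norm_num
  simp only [PySem.Int.floordiv_eq_ediv_of_pos h3]
  obtain ⟨k, hk⟩ : ∃ k : Nat, (s+2)/3 = max 1 (1 - (n-2*s)/3) + (k:Int) :=
    ⟨((s+2)/3 - max 1 (1 - (n-2*s)/3)).toNat, by
      have : max 1 (1 - (n-2*s)/3) ≤ (s+2)/3 := max_le (by omega) (by omega)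
      omega⟩
  rw [hk, pvListSumIco]

-- B's per-d term as a Finset sum (for d the loop visits)
lemma pvHB_finset (n d : Int) (_hd1 : 1 ≤ d) (hd2 : d < (n-6)/2 + 1) :
    (∑ b ∈ Finset.Ico (1:Int) ((n-2*d)/3), 3 * d * b) = pvHB n d := by
  unfold pvHB
  have h3 : (0:Int) < 3 := by norm_num
  simp only [PySem.Int.floordiv_eq_ediv_of_pos h3]
  obtain ⟨m, hm⟩ : ∃ m : Nat, (n-2*d)/3 - 1 = (m:Int) :=
    ⟨((n-2*d)/3 - 1).toNat, by omega⟩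
  rw [show (n-2*d)/3 = (m:Int)+1 by omega, ← Finset.mul_sum, pvGauss m,
    show (m:Int) + 1 - 1 = (m:Int) by ring]
  rfl

-- closed form of the bonus sum
lemma pvBonusSum (k : Nat) :
    ((PySem.List.pyRange 3 (3 + (k:Int)) 1).map pvBonus).sum
      = pvTri (((k:Int) + 2) / 3) := by
  induction k with
  | zero =>
      rw [PySem.List.pyRange_one_eq_nil (by omega : (3:Int) + (0:Nat) ≤ 3)]
      norm_num
      simp [pvTri, PySem.Int.floordiv]
  | succ m ih =>
      have hsplit : PySem.List.pyRange 3 (3 + ((m:Int) + 1)) 1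
          = PySem.List.pyRange 3 (3 + (m:Int)) 1 ++ [3 + (m:Int)] := by
        rw [show (3:Int) + ((m:Int) + 1) = (3 + (m:Int)) + 1 by ring]
        exact PySem.List.pyRange_one_succ_right (by omega)
      push_cast
      rw [hsplit, List.map_append, List.sum_append, ih]
      simp only [List.map_cons, List.map_nil, List.sum_cons, List.sum_nil, add_zero]
      unfold pvBonus
      have h3 : (0:Int) < 3 := by norm_num
      rw [PySem.Int.mod_eq_emod_of_pos h3, PySem.Int.floordiv_eq_ediv_of_pos h3]
      by_cases h : (3 + (m:Int)) % 3 = 0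
      · have hdiv : ((m:Int) + 1 + 2) / 3 = ((m:Int) + 2) / 3 + 1 := by omega
        have hval : (3 + (m:Int)) / 3 = ((m:Int) + 2) / 3 + 1 := by omega
        rw [if_pos h, hdiv, hval, pvTri_succ]
      · have hdiv : ((m:Int) + 1 + 2) / 3 = ((m:Int) + 2) / 3 := by omega
        rw [if_neg h, hdiv, add_zero]

-- ===== VERDICT (by name: the statement is the Claim_ definition above) =====
theorem solution_spec : Claim_equal_solution := by
  intro n _
  unfold Spec_solution solution solution_alt
  rw [pvFoldlA, zero_add]
  by_cases h6 : n < 6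
  · rw [if_pos h6, PySem.List.pyRange_one_eq_nil (by omega : n - 2 ≤ 3)]; simp
  · rw [if_neg h6]
    rw [pvFoldlB]
    have h2 : (0:Int) < 2 := by norm_num
    have h3 : (0:Int) < 3 := by norm_num
    have hmap : (PySem.List.pyRange 3 (n - 2) 1).map (pvGA n)
        = (PySem.List.pyRange 3 (n - 2) 1).map (fun s => pvBonus s + pvInnerL n s) :=
      List.map_congr_left (fun s hs => by
        rw [PySem.List.mem_pyRange_one] at hs
        exact pvTerm_eq n s hs.1 hs.2)
    rw [hmap, PySem.List.sum_map_add_int]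
    -- bonus part
    obtain ⟨k, hk⟩ : ∃ k : Nat, n - 2 = 3 + (k:Int) := ⟨(n - 5).toNat, by omega⟩
    have hbonus : ((PySem.List.pyRange 3 (n - 2) 1).map pvBonus).sum
        = PySem.Int.floordiv (PySem.Int.floordiv (n-3) 3
            * (PySem.Int.floordiv (n-3) 3 + 1)) 2 := by
      rw [hk, pvBonusSum k]
      simp only [pvTri, PySem.Int.floordiv_eq_ediv_of_pos h3,
        show ((k:Int) + 2) = n - 3 by omega]
    -- inner part: list → Finset, swap, Finset → list
    have hinner : ((PySem.List.pyRange 3 (n - 2) 1).map (fun s => pvInnerL n s)).sum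
        = ((PySem.List.pyRange 1 (PySem.Int.floordiv (n-6) 2 + 1) 1).map (pvHB n)).sum := by
      have hA : ((PySem.List.pyRange 3 (n - 2) 1).map (fun s => pvInnerL n s)).sum
          = ∑ s ∈ Finset.Ico (3:Int) (n-2), pvInnerL n s := by
        rw [hk, pvListSumIco (fun s => pvInnerL n s) 3 k]
      have hB : ((PySem.List.pyRange 1 (PySem.Int.floordiv (n-6) 2 + 1) 1).map (pvHB n)).sum
          = ∑ d ∈ Finset.Ico (1:Int) ((n-6)/2 + 1), pvHB n d := by
        simp only [PySem.Int.floordiv_eq_ediv_of_pos h2]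
        obtain ⟨k2, hk2⟩ : ∃ k2 : Nat, (n-6)/2 + 1 = 1 + (k2:Int) :=
          ⟨((n-6)/2).toNat, by omega⟩
        rw [hk2, pvListSumIco (pvHB n) 1 k2]
      rw [hA, hB]
      refine Eq.trans (Finset.sum_congr rfl (fun s hs => by
          rw [Finset.mem_Ico] at hs
          exact pvInnerL_finset n s hs.1 hs.2))
        (Eq.trans (pvSwap n)
          (Finset.sum_congr rfl (fun d hd => by
            rw [Finset.mem_Ico] at hd
            exact pvHB_finset n d hd.1 hd.2)))
    rw [hbonus, hinner]
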